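-- pv_equiv track=rewrite | github.com/AdeptLearner123/code-names-bot-processing-legacy | page_extraction/page_extractor.py | get_excerpt
-- ===== SOURCE A (Python) =====
-- def get_excerpt(term_sentence_counts, title_sentence_counts, sentences):
--     half_excerpt = None
--     for i in range(len(term_sentence_counts)):
--         if title_sentence_counts[i] > 0 and term_sentence_counts[i] > 0:
--             return sentences[i]
--         if term_sentence_counts[i] > 0 and half_excerpt is None:
--             half_excerpt = sentences[i]
--     return half_excerpt if half_excerpt is not None else ''
-- ===== SOURCE B (Python) =====
-- def get_excerpt(term_sentence_counts, title_sentence_counts, sentences):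
--     full = next((s for t, ti, s in zip(term_sentence_counts, title_sentence_counts, sentences)
--                  if t > 0 and ti > 0), None)
--     if full is not None:
--         return full
--     half = next((s for t, s in zip(term_sentence_counts, sentences) if t > 0), None)
--     return half if half is not None else ''
-- ===== Notes on version B (the rewrite author's own statement) =====
-- stated objective: idiomatic
-- what changed: Replaced the single index loop with a mutable half_excerpt accumulator by two lazy zip-based searches: first triple with both counts positive, else first pair with a positive term count, else ''.
-- outside the precondition, e.g. on get_excerpt([0], [1], []): A returns '', B returns ''; on get_excerpt([1], [], ['a']): A raises IndexError, B returns 'a'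
import Mathlib
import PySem

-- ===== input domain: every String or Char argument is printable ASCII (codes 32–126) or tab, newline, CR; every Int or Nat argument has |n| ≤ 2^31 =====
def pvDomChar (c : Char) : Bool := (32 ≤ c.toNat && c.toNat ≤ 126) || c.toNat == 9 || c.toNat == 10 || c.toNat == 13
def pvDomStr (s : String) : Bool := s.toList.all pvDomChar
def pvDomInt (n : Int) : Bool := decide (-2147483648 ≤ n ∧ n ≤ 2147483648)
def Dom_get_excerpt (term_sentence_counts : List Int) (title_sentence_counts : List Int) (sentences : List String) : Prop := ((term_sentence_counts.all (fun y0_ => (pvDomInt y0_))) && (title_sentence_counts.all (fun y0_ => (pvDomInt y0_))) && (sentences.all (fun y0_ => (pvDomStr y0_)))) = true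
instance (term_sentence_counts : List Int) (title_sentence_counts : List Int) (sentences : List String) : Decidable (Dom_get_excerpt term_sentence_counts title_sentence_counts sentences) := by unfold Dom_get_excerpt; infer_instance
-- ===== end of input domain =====

-- B replaces A's index loop with a half_excerpt accumulator by two lazy zip-based searches (idiomatic); equivalence is about the return value only.

-- ===== PORT A =====
-- the for-loop over range(len(term_sentence_counts)) with early return and the half_excerpt accumulator
def pvLoopA (term title : List Int) (sentences : List String) (i : Nat) (half : Option String) : String :=
  if _h : i < term.length then
    if PySem.List.pyGetD title (i : Int) 0 > 0 ∧ PySem.List.pyGetD term (i : Int) 0 > 0 then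
      PySem.List.pyGetD sentences (i : Int) ""
    else
      pvLoopA term title sentences (i + 1)
        (if PySem.List.pyGetD term (i : Int) 0 > 0 ∧ half = none then
           some (PySem.List.pyGetD sentences (i : Int) "")
         else half)
  else
    match half with
    | some s => s
    | none => ""
termination_by term.length - i

def get_excerpt (term_sentence_counts : List Int) (title_sentence_counts : List Int) (sentences : List String) : String :=
  pvLoopA term_sentence_counts title_sentence_counts sentences 0 none

-- ===== PORT B =====
def get_excerpt_alt (term_sentence_counts : List Int) (title_sentence_counts : List Int) (sentences : List String) : String :=
  match (term_sentence_counts.zip (title_sentence_counts.zip sentences)).find?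
      (fun p => decide (0 < p.1) && decide (0 < p.2.1)) with
  | some p => p.2.2
  | none =>
    match (term_sentence_counts.zip sentences).find? (fun p => decide (0 < p.1)) with
    | some p => p.2
    | none => ""

-- ===== PRECONDITION & SPEC =====
-- A indexes title_sentence_counts[i] (and, on positive counts, sentences[i]) for i up to
-- len(term_sentence_counts)-1 and raises IndexError on shorter lists; the uniform length bound below also
-- excludes a few inputs where a shorter list escapes indexing because no positive count reaches it.
def Pre_get_excerpt (term_sentence_counts : List Int) (title_sentence_counts : List Int) (sentences : List String) : Prop :=
  term_sentence_counts.length ≤ title_sentence_counts.length ∧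
  term_sentence_counts.length ≤ sentences.length
instance (term_sentence_counts : List Int) (title_sentence_counts : List Int) (sentences : List String) : Decidable (Pre_get_excerpt term_sentence_counts title_sentence_counts sentences) := by unfold Pre_get_excerpt; infer_instance
def pvWitness_get_excerpt : List Int × List Int × List String := ([1, 0], [0, 1], ["a", "b"])

def Spec_get_excerpt (term_sentence_counts : List Int) (title_sentence_counts : List Int) (sentences : List String) (out : String) : Prop := out = get_excerpt_alt term_sentence_counts title_sentence_counts sentences
instance (term_sentence_counts : List Int) (title_sentence_counts : List Int) (sentences : List String) (out : String) : Decidable (Spec_get_excerpt term_sentence_counts title_sentence_counts sentences out) := by unfold Spec_get_excerpt; infer_instance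

-- ===== CLAIM (what is proved, stated in full; the proofs are below) =====
def Claim_equal_get_excerpt : Prop := ∀ (term_sentence_counts : List Int) (title_sentence_counts : List Int) (sentences : List String), Dom_get_excerpt term_sentence_counts title_sentence_counts sentences → Pre_get_excerpt term_sentence_counts title_sentence_counts sentences → Spec_get_excerpt term_sentence_counts title_sentence_counts sentences (get_excerpt term_sentence_counts title_sentence_counts sentences)

-- ===== LEMMAS AND PROOFS =====

-- the loop, from index i with accumulator half, equals B's two searches over the dropped prefixes
theorem pvLoopA_eq (term title : List Int) (sentences : List String)
    (hti : term.length ≤ title.length) (hs : term.length ≤ sentences.length) :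
    ∀ i half, pvLoopA term title sentences i half =
      match ((term.zip (title.zip sentences)).drop i).find?
          (fun p => decide (0 < p.1) && decide (0 < p.2.1)) with
      | some p => p.2.2
      | none =>
        match half with
        | some s => s
        | none =>
          match ((term.zip sentences).drop i).find? (fun p => decide (0 < p.1)) with
          | some p => p.2
          | none => "" := by
  have hz3 : (term.zip (title.zip sentences)).length = term.length := by
    simp [List.length_zip]; omega
  have hz2 : (term.zip sentences).length = term.length := by
    simp [List.length_zip]; omega
  have key : ∀ k i half, term.length - i ≤ k → pvLoopA term title sentences i half =
      match ((term.zip (title.zip sentences)).drop i).find?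
          (fun p => decide (0 < p.1) && decide (0 < p.2.1)) with
      | some p => p.2.2
      | none =>
        match half with
        | some s => s
        | none =>
          match ((term.zip sentences).drop i).find? (fun p => decide (0 < p.1)) with
          | some p => p.2
          | none => "" := by
    intro k
    induction k with
    | zero =>
      intro i half hk
      have hi : ¬ i < term.length := by omega
      rw [pvLoopA.eq_def, dif_neg hi]
      rw [List.drop_eq_nil_of_le (by omega), List.drop_eq_nil_of_le (by omega)]
      cases half <;> simp [List.find?]
    | succ k ih =>
      intro i half hk
      by_cases hi : i < term.length
      · -- unfold one loop step and one cons of each dropped list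
        have hig3 : i < (term.zip (title.zip sentences)).length := by omega
        have hig2 : i < (term.zip sentences).length := by omega
        have hd3 : (term.zip (title.zip sentences)).drop i =
            (term.zip (title.zip sentences))[i] :: (term.zip (title.zip sentences)).drop (i + 1) :=
          List.drop_eq_getElem_cons hig3
        have hd2 : (term.zip sentences).drop i =
            (term.zip sentences)[i] :: (term.zip sentences).drop (i + 1) :=
          List.drop_eq_getElem_cons hig2
        have hiti : i < title.length := by omega
        have his : i < sentences.length := by omega
        have hg3 : (term.zip (title.zip sentences))[i] = (term[i], (title[i], sentences[i])) := by
          simp [List.getElem_zip]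
        have hg2 : (term.zip sentences)[i] = (term[i], sentences[i]) := by
          simp [List.getElem_zip]
        have hgdT : PySem.List.pyGetD term (i : Int) 0 = term[i] := by
          simp [List.getD, List.getElem?_eq_getElem hi]
        have hgdTi : PySem.List.pyGetD title (i : Int) 0 = title[i] := by
          simp [List.getD, List.getElem?_eq_getElem hiti]
        have hgdS : PySem.List.pyGetD sentences (i : Int) "" = sentences[i] := by
          simp [List.getD, List.getElem?_eq_getElem his]
        rw [pvLoopA.eq_def, dif_pos hi, hgdT, hgdTi, hgdS, hd3, hd2, hg3, hg2]
        by_cases hboth : 0 < title[i] ∧ 0 < term[i]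
        · rw [if_pos hboth]
          simp [List.find?, hboth.1, hboth.2]
        · rw [if_neg hboth]
          rw [ih (i + 1) _ (by omega)]
          by_cases ht : 0 < term[i]
          · have hti' : ¬ 0 < title[i] := fun h => hboth ⟨h, ht⟩
            cases half with
            | none =>
              simp [List.find?, ht, hti']
            | some s =>
              simp [List.find?, ht, hti']
          · simp [List.find?, ht]
      · have hi' : ¬ i < term.length := hi
        rw [pvLoopA.eq_def, dif_neg hi']
        rw [List.drop_eq_nil_of_le (by omega), List.drop_eq_nil_of_le (by omega)]
        cases half <;> simp [List.find?]
  intro i half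
  exact key (term.length - i) i half le_rfl

theorem get_excerpt_spec : Claim_equal_get_excerpt := by
  unfold Claim_equal_get_excerpt
  intro term title sentences _hdom hpre
  unfold Spec_get_excerpt get_excerpt get_excerpt_alt
  rw [pvLoopA_eq term title sentences hpre.1 hpre.2 0 none]
  simp
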